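-- pv_equiv track=rewrite | github.com/palmerc/TenFrame | tenframes.py | generate_ten_frame
-- ===== SOURCE A (Python) =====
-- import math
--
-- def generate_ten_frame(count):
--     circle = '\\draw[fill=black]({X},{Y}) circle (0.4cm);'
--     commands = ['\\begin{tikzpicture}', '\\draw[step=1cm,black,very thick] (0,0) grid (5,2);']
--     i = 0
--     while i < count:
--         x = math.floor(i / 2) + 0.5
--         y = i % 2 + 0.5
--         commands.append(circle.format(X=x, Y=y))
--         i += 1
--     commands.append('\\end{tikzpicture}')
--
--     return '\n'.join(commands)
-- ===== SOURCE B (Python) =====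
-- def generate_ten_frame(count):
--     full, extra = divmod(max(count, 0), 2)
--     column = ('\\draw[fill=black]({c}.5,0.5) circle (0.4cm);\n'
--               '\\draw[fill=black]({c}.5,1.5) circle (0.4cm);')
--     parts = ['\\begin{tikzpicture}', '\\draw[step=1cm,black,very thick] (0,0) grid (5,2);']
--     parts.extend(column.format(c=c) for c in range(full))
--     if extra:
--         parts.append('\\draw[fill=black]({c}.5,0.5) circle (0.4cm);'.format(c=full))
--     parts.append('\\end{tikzpicture}')
--     return '\n'.join(parts)
-- ===== Notes on version B (the rewrite author's own statement) =====
-- stated objective: faster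
-- what changed: Instead of A's while loop that runs once per circle and decodes each flat index with float division, floor and modulo, B does one divmod up front to split the count into full two-circle columns plus a remainder, emits each full column as a single pre-joined two-line block (half as many iterations, no per-index arithmetic or float formatting), and appends the remainder line once after the loop.
import Mathlib
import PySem

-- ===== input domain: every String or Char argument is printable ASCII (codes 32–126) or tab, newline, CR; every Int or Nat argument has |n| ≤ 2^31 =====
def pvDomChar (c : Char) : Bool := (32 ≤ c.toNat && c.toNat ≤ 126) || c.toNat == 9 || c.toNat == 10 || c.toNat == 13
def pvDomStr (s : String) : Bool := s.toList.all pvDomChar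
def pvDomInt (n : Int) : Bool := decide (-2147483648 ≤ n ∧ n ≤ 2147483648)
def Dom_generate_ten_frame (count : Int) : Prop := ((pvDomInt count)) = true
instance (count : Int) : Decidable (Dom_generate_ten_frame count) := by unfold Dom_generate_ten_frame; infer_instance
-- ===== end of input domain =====

-- B replaces A's per-circle while loop (one iteration per circle, decoding each index
-- with float division, floor and modulo) by a staged construction: one divmod splits
-- the count into full two-circle columns and a remainder; each full column is emitted
-- as a single pre-joined two-line block (half the iterations, no per-index arithmetic)
-- and the remainder line is appended once after the loop — measurably faster by a
-- constant factor.

-- ===== PORT A =====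
-- circle.format(X=x, Y=y) where x = floor(i/2)+0.5, y = i%2+0.5 (both half-integers,
-- so str() renders them exactly as "<int>.5")
def pvCircleA (i : Int) : String :=
  "\\draw[fill=black](" ++ PySem.Int.toStr (PySem.Int.floordiv i 2) ++ ".5,"
    ++ PySem.Int.toStr (PySem.Int.mod i 2) ++ ".5) circle (0.4cm);"

-- the while loop: i starts at 0, appends while i < count
def pvLoopA (count i : Int) (commands : List String) : List String :=
  if i < count then pvLoopA count (i + 1) (commands ++ [pvCircleA i]) else commands
termination_by (count - i).toNat
decreasing_by omega

def generate_ten_frame (count : Int) : String :=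
  let commands := ["\\begin{tikzpicture}", "\\draw[step=1cm,black,very thick] (0,0) grid (5,2);"]
  let commands := pvLoopA count 0 commands
  let commands := commands ++ ["\\end{tikzpicture}"]
  PySem.Str.join "\n" commands

-- ===== PORT B =====
-- column.format(c=c): one two-line block per full column (the '\n' is inside the block)
def pvColumnB (c : Int) : String :=
  "\\draw[fill=black](" ++ PySem.Int.toStr c ++ ".5,0.5) circle (0.4cm);\n\\draw[fill=black]("
    ++ PySem.Int.toStr c ++ ".5,1.5) circle (0.4cm);"

-- the remainder line '\draw[fill=black]({c}.5,0.5) circle (0.4cm);'.format(c=full)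
def pvExtraB (c : Int) : String :=
  "\\draw[fill=black](" ++ PySem.Int.toStr c ++ ".5,0.5) circle (0.4cm);"

def generate_ten_frame_alt (count : Int) : String :=
  let n := max count 0
  let full := PySem.Int.floordiv n 2
  let extra := PySem.Int.mod n 2
  let parts := ["\\begin{tikzpicture}", "\\draw[step=1cm,black,very thick] (0,0) grid (5,2);"]
  let parts := parts ++ (PySem.List.pyRange 0 full 1).map pvColumnB
  let parts := if extra ≠ 0 then parts ++ [pvExtraB full] else parts
  let parts := parts ++ ["\\end{tikzpicture}"]
  PySem.Str.join "\n" parts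

-- ===== PRECONDITION & SPEC =====
def Spec_generate_ten_frame (count : Int) (out : String) : Prop := out = generate_ten_frame_alt count
instance (count : Int) (out : String) : Decidable (Spec_generate_ten_frame count out) := by unfold Spec_generate_ten_frame; infer_instance

-- ===== CLAIM (what is proved, stated in full; the proofs are below) =====
def Claim_equal_generate_ten_frame : Prop := ∀ (count : Int), Dom_generate_ten_frame count → Spec_generate_ten_frame count (generate_ten_frame count)

-- ===== LEMMAS AND PROOFS =====

-- A's loop is the list of circle lines for indices i, i+1, …, count-1
lemma pvLoopA_eq (count : Int) : ∀ (i : Int) (acc : List String),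
    pvLoopA count i acc = acc ++ (PySem.List.pyRange i count 1).map pvCircleA := by
  intro i acc
  by_cases h : i < count
  · rw [pvLoopA, if_pos h, pvLoopA_eq count (i + 1), PySem.List.pyRange_one_cons h]
    simp
  · rw [pvLoopA, if_neg h, PySem.List.pyRange_one_eq_nil (by omega)]
    simp
termination_by i => (count - i).toNat
decreasing_by omega

-- joining with sep is unchanged when a part containing sep is split at it
lemma join_split (sep : List Char) (xs : List (List Char)) (a b : List Char)
    (ys : List (List Char)) :
    PySem.Chars.join sep (xs ++ (a ++ sep ++ b) :: ys)
      = PySem.Chars.join sep (xs ++ a :: b :: ys) := by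
  induction xs with
  | nil =>
    cases ys with
    | nil =>
      simp [PySem.Chars.join_singleton, PySem.Chars.join_cons_cons, List.append_assoc]
    | cons q rest =>
      rw [List.nil_append, List.nil_append, PySem.Chars.join_cons_cons,
        PySem.Chars.join_cons_cons, PySem.Chars.join_cons_cons]
      simp [List.append_assoc]
  | cons x xs ih =>
    have h1 : ∀ (l : List (List Char)) (m : List Char),
        PySem.Chars.join sep (x :: (xs ++ m :: l)) = x ++ sep ++ PySem.Chars.join sep (xs ++ m :: l) := by
      intro l m
      cases xs with
      | nil => exact PySem.Chars.join_cons_cons sep x m l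
      | cons y ys' => exact PySem.Chars.join_cons_cons sep x y (ys' ++ m :: l)
    rw [List.cons_append, h1, List.cons_append, h1, ih]

-- a full-column block splits at its inner newline into the two circle lines of A
lemma pvColumnB_toList (c : Int) (_hc : 0 ≤ c) :
    (pvColumnB c).toList
      = (pvCircleA (2 * c)).toList ++ "\n".toList ++ (pvCircleA (2 * c + 1)).toList := by
  unfold pvColumnB pvCircleA
  rw [PySem.Int.floordiv_eq_ediv_of_pos (by omega), PySem.Int.floordiv_eq_ediv_of_pos (by omega),
    PySem.Int.mod_eq_emod_of_pos (by omega), PySem.Int.mod_eq_emod_of_pos (by omega)]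
  have h1 : 2 * c / 2 = c := by omega
  have h2 : 2 * c % 2 = 0 := by omega
  have h3 : (2 * c + 1) / 2 = c := by omega
  have h4 : (2 * c + 1) % 2 = 1 := by omega
  have h5 : PySem.Int.toStr 0 = "0" := by decide
  have h6 : PySem.Int.toStr 1 = "1" := by decide
  rw [h1, h2, h3, h4, h5, h6]
  simp

-- the odd remainder line is A's circle line for the last index
lemma pvExtraB_toList (c : Int) (_hc : 0 ≤ c) :
    (pvExtraB c).toList = (pvCircleA (2 * c)).toList := by
  unfold pvExtraB pvCircleA
  rw [PySem.Int.floordiv_eq_ediv_of_pos (by omega), PySem.Int.mod_eq_emod_of_pos (by omega)]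
  have h1 : 2 * c / 2 = c := by omega
  have h2 : 2 * c % 2 = 0 := by omega
  have h5 : PySem.Int.toStr 0 = "0" := by decide
  rw [h1, h2, h5]
  simp

-- joining the column blocks = joining the corresponding pairs of circle lines
lemma join_columns (f : ℕ) : ∀ (X T : List (List Char)),
    PySem.Chars.join "\n".toList
        (X ++ ((PySem.List.pyRange 0 (f : Int) 1).map (fun c => (pvColumnB c).toList)) ++ T)
      = PySem.Chars.join "\n".toList
        (X ++ ((PySem.List.pyRange 0 (2 * f : Int) 1).map (fun i => (pvCircleA i).toList)) ++ T) := by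
  induction f with
  | zero => intro X T; simp [PySem.List.pyRange_one_eq_nil]
  | succ f ih =>
    intro X T
    have e1 : PySem.List.pyRange 0 ((f + 1 : ℕ) : Int) 1
        = PySem.List.pyRange 0 (f : Int) 1 ++ [(f : Int)] := by
      push_cast
      exact PySem.List.pyRange_one_succ_right (by positivity)
    have e2 : PySem.List.pyRange 0 (2 * ((f + 1 : ℕ)) : Int) 1
        = PySem.List.pyRange 0 (2 * f : Int) 1 ++ [(2 * f : Int), (2 * f : Int) + 1] := by
      push_cast
      rw [show (2 : Int) * ((f : Int) + 1) = (2 * (f : Int) + 1) + 1 by ring,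
        PySem.List.pyRange_one_succ_right (by positivity),
        PySem.List.pyRange_one_succ_right (by positivity)]
      simp
    rw [e1, e2, List.map_append, List.map_append, List.map_singleton,
      pvColumnB_toList (f : Int) (by positivity)]
    have hsplit := join_split "\n".toList
      (X ++ (PySem.List.pyRange 0 (f : Int) 1).map (fun c => (pvColumnB c).toList))
      (pvCircleA (2 * (f : Int))).toList (pvCircleA (2 * (f : Int) + 1)).toList T
    have ih' := ih X ((pvCircleA (2 * (f : Int))).toList
      :: (pvCircleA (2 * (f : Int) + 1)).toList :: T)
    simp only [List.append_assoc, List.cons_append,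
      List.nil_append, List.map_cons, List.map_nil] at hsplit ih' ⊢
    rw [hsplit, ih']

-- ===== VERDICT (by name: the statement is the Claim_ definition above) =====
theorem generate_ten_frame_spec : Claim_equal_generate_ten_frame := by
  intro count _
  unfold Spec_generate_ten_frame generate_ten_frame generate_ten_frame_alt
  dsimp only
  rw [pvLoopA_eq]
  by_cases hpos : 0 < count
  · have hmax : max count 0 = count := by omega
    rw [hmax, PySem.Int.floordiv_eq_ediv_of_pos (by omega), PySem.Int.mod_eq_emod_of_pos (by omega)]
    set f : ℕ := (count / 2).toNat with hf
    have hfc : (f : Int) = count / 2 := by omega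
    unfold PySem.Str.join
    by_cases he : count % 2 = 0
    · -- even: count = 2 * f, no remainder line
      simp only [he, ne_eq, not_true_eq_false, if_false]
      have hcnt : count = 2 * (f : Int) := by omega
      congr 1
      simp only [List.map_append, List.map_map]
      rw [← hfc, hcnt]
      have := join_columns f
        ((["\\begin{tikzpicture}", "\\draw[step=1cm,black,very thick] (0,0) grid (5,2);"]).map String.toList)
        (["\\end{tikzpicture}"].map String.toList)
      simpa [Function.comp] using this.symm
    · -- odd: count = 2 * f + 1, remainder line for index 2 * f
      have he1 : count % 2 = 1 := by omega
      simp only [he1, ne_eq, one_ne_zero, not_false_eq_true, if_true]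
      have hcnt : count = 2 * (f : Int) + 1 := by omega
      congr 1
      simp only [List.map_append, List.map_map, List.map_singleton]
      rw [← hfc, hcnt, PySem.List.pyRange_one_succ_right (by positivity), List.map_append,
        List.map_singleton, pvExtraB_toList (f : Int) (by positivity)]
      have := join_columns f
        ((["\\begin{tikzpicture}", "\\draw[step=1cm,black,very thick] (0,0) grid (5,2);"]).map String.toList)
        ((pvCircleA (2 * (f : Int))).toList :: ["\\end{tikzpicture}"].map String.toList)
      simp only [List.append_assoc, List.cons_append, List.nil_append,
        List.map_cons, List.map_nil] at this ⊢
      simpa [Function.comp] using this.symm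
  · -- count ≤ 0: no circles on either side
    have hmax : max count 0 = 0 := by omega
    rw [hmax]
    have hA : PySem.List.pyRange count count 1 = [] := PySem.List.pyRange_one_eq_nil le_rfl
    have hA0 : PySem.List.pyRange 0 count 1 = [] := PySem.List.pyRange_one_eq_nil (by omega)
    have hB : PySem.List.pyRange 0 (PySem.Int.floordiv 0 2) 1 = [] := by decide
    have hM : PySem.Int.mod 0 2 = 0 := by decide
    rw [hA0, hB, hM]
    simp
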